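-- pv_equiv track=rewrite | github.com/GalaxyShadesCat/mut-epi-origin | scripts/grid_search/results.py | canonicalise_celltype
-- ===== SOURCE A (Python) =====
-- from typing import Any, Dict, List, Optional, Sequence, Tuple
--
-- def canonicalise_celltype(value: Any) -> Optional[str]:
--     if value is None:
--         return None
--     s = str(value).strip()
--     if not s:
--         return None
--     s = s.lower().replace(" ", "_")
--     while "__" in s:
--         s = s.replace("__", "_")
--     if s in ("myelprog", "myel_prog"):
--         return "myel_prog"
--     if s in ("esoepi", "eso_epi"):
--         return "eso_epi"
--     if s in ("neurostem", "neuro_stem"):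
--         return "neuro_stem"
--     return s
-- ===== SOURCE B (Python) =====
-- from typing import Any, Optional
--
-- def canonicalise_celltype(value: Any) -> Optional[str]:
--     if value is None:
--         return None
--     s = str(value).strip()
--     if not s:
--         return None
--     s = s.lower().replace(" ", "_")
--     out = []
--     for c in s:
--         if c == "_" and out and out[-1] == "_":
--             continue
--         out.append(c)
--     s = "".join(out)
--     aliases = {"myelprog": "myel_prog", "esoepi": "eso_epi", "neurostem": "neuro_stem"}
--     return aliases.get(s, s)
-- ===== Notes on version B (the rewrite author's own statement) =====
-- stated objective: alternative
-- what changed: The fixpoint loop that repeatedly rescans and replaces adjacent duplicate underscores until none remain is replaced by a single left-to-right pass that skips an underscore immediately following a kept underscore, and the three alias if-chains by one dict lookup.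
import Mathlib
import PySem

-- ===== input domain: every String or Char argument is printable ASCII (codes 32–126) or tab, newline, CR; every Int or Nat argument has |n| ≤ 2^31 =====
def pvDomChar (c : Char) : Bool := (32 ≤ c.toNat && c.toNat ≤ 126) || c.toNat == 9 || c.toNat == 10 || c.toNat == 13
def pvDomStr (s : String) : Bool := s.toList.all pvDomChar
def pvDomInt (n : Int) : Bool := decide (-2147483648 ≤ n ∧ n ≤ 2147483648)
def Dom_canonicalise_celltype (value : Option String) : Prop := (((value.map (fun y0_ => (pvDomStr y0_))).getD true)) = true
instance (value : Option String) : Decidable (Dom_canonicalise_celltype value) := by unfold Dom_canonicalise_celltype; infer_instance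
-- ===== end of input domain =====

-- B replaces A's repeated-rescan underscore-collapsing loop with one left-to-right pass that
-- skips an underscore following a kept underscore, and the alias if-chain with a dict lookup.


-- ===== PORT A =====
-- the while-loop that repeatedly collapses adjacent duplicate underscores; fuel only makes it total
-- (fuel = s.length suffices since each iteration strictly shrinks s)
def collapseA : Nat → List Char → List Char
  | 0, s => s
  | fuel + 1, s =>
    if PySem.Chars.isIn ['_', '_'] s then
      collapseA fuel (PySem.Chars.replace s ['_', '_'] ['_'])
    else s

def canonicalise_celltype (value : Option String) : Option String :=
  match value with
  | none => none
  | some v =>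
    let s := PySem.Str.strip v
    if s = "" then none
    else
      let s := PySem.Str.replace (PySem.Str.lower s) " " "_"
      let s := String.ofList (collapseA s.toList.length s.toList)
      if s = "myelprog" || s = "myel_prog" then some "myel_prog"
      else if s = "esoepi" || s = "eso_epi" then some "eso_epi"
      else if s = "neurostem" || s = "neuro_stem" then some "neuro_stem"
      else some s

-- ===== PORT B =====
def canonicalise_celltype_alt (value : Option String) : Option String :=
  match value with
  | none => none
  | some v =>
    let s := PySem.Str.strip v
    if s = "" then none
    else
      let s := PySem.Str.replace (PySem.Str.lower s) " " "_"
      -- `out` is kept reversed, so Python's `out and out[-1] == "_"` is `out.head? == some '_'`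
      let out := s.toList.foldl
        (fun acc c => if c == '_' && acc.head? == some '_' then acc else c :: acc) []
      let s := String.ofList out.reverse
      let aliases : PySem.Dict String String :=
        ((PySem.Dict.empty.insert "myelprog" "myel_prog").insert "esoepi" "eso_epi").insert
          "neurostem" "neuro_stem"
      some (aliases.getD s s)

-- ===== PRECONDITION & SPEC =====
def Spec_canonicalise_celltype (value : Option String) (out : Option String) : Prop := out = canonicalise_celltype_alt value
instance (value : Option String) (out : Option String) : Decidable (Spec_canonicalise_celltype value out) := by unfold Spec_canonicalise_celltype; infer_instance

-- ===== CLAIM (what is proved, stated in full; the proofs are below) =====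
def Claim_equal_canonicalise_celltype : Prop := ∀ (value : Option String), Dom_canonicalise_celltype value → Spec_canonicalise_celltype value (canonicalise_celltype value)

-- ===== LEMMAS AND PROOFS =====

-- simple recursive characterisation of one Python replace pass (old = two underscores, new = one)
def rep2 : List Char → List Char
  | [] => []
  | [c] => [c]
  | c :: d :: t => if c = '_' ∧ d = '_' then '_' :: rep2 t else c :: rep2 (d :: t)

-- one-pass squeeze with a "previous kept char was '_'" flag
def sqP : Bool → List Char → List Char
  | _, [] => []
  | b, c :: t => if b = true ∧ c = '_' then sqP true t else c :: sqP (c == '_') t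

theorem replace_go_eq (fuel : Nat) (l acc : List Char) (h : l.length ≤ fuel) :
    PySem.Chars.replace.go ['_', '_'] ['_'] fuel l acc = acc.reverse ++ rep2 l := by
  induction fuel generalizing l acc with
  | zero =>
    match l with
    | [] => simp [PySem.Chars.replace.go, rep2]
    | c :: t => simp at h
  | succ f ih =>
    match l with
    | [] => simp [PySem.Chars.replace.go, rep2]
    | [c] =>
      rw [PySem.Chars.replace.go]
      have hp : List.isPrefixOf ['_', '_'] [c] = false := by simp [List.isPrefixOf]
      rw [hp]
      simp only [Bool.false_eq_true, if_false]
      rw [ih [] (c :: acc) (by simp)]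
      simp [rep2]
    | c :: d :: t =>
      rw [PySem.Chars.replace.go, rep2]
      by_cases hcd : c = '_' ∧ d = '_'
      · obtain ⟨rfl, rfl⟩ := hcd
        have hp : List.isPrefixOf ['_', '_'] ('_' :: '_' :: t) = true := by
          simp [List.isPrefixOf]
        rw [hp, if_pos rfl, if_pos ⟨rfl, rfl⟩]
        simp only [List.length_cons, List.length_nil, List.drop_succ_cons, List.drop_zero,
          List.reverse_cons, List.reverse_nil, List.nil_append, List.singleton_append]
        rw [ih t ('_' :: acc) (by simp at h ⊢; omega)]
        simp
      · have hp : List.isPrefixOf ['_', '_'] (c :: d :: t) = false := by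
          rcases not_and_or.mp hcd with hc | hd
          · simp [List.isPrefixOf]; intro h'; exact absurd h'.symm hc
          · simp [List.isPrefixOf]; intro _ h'; exact absurd h'.symm hd
        rw [hp]
        simp only [Bool.false_eq_true, if_false]
        rw [if_neg hcd, ih (d :: t) (c :: acc) (by simp at h ⊢; omega)]
        simp

theorem replace2_eq (l : List Char) :
    PySem.Chars.replace l ['_', '_'] ['_'] = rep2 l := by
  rw [PySem.Chars.replace]
  simp only [List.isEmpty_cons, Bool.false_eq_true, if_false]
  exact replace_go_eq l.length l [] le_rfl

theorem rep2_length_le (l : List Char) : (rep2 l).length ≤ l.length := by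
  induction l using rep2.induct with
  | case1 => simp [rep2]
  | case2 c => simp [rep2]
  | case3 c d t hcd ih =>
    rw [rep2, if_pos hcd]
    simp
    omega
  | case4 c d t hcd ih =>
    rw [rep2, if_neg hcd]
    simpa using ih

theorem rep2_length_lt (l : List Char) (h : ['_', '_'] <:+: l) :
    (rep2 l).length < l.length := by
  induction l using rep2.induct with
  | case1 => simp at h
  | case2 c =>
    exfalso
    rcases h with ⟨p, s, hps⟩
    have := congrArg List.length hps
    simp at this
    omega
  | case3 c d t hcd _ =>
    rw [rep2, if_pos hcd]
    have := rep2_length_le t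
    simp; omega
  | case4 c d t hcd ih =>
    rw [rep2, if_neg hcd]
    have hdt : ['_', '_'] <:+: d :: t := by
      rcases List.infix_cons_iff.mp h with hpre | h'
      · exfalso
        rcases hpre with ⟨u, hu⟩
        have h1 : c = '_' := by
          have := congrArg List.head? hu; simpa using this.symm
        have h2 : d = '_' := by
          have := congrArg (fun x => x.tail.head?) hu; simpa using this.symm
        exact hcd ⟨h1, h2⟩
      · exact h'
    simpa using ih hdt

theorem sqP_cons_skip (t : List Char) : sqP true ('_' :: t) = sqP true t := by
  rw [sqP, if_pos ⟨rfl, rfl⟩]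

theorem sqP_cons_keep (b : Bool) (c : Char) (t : List Char) (h : ¬ (b = true ∧ c = '_')) :
    sqP b (c :: t) = c :: sqP (c == '_') t := by
  rw [sqP, if_neg h]

theorem sqP_no_infix (b : Bool) (l : List Char) (h : ¬ ['_', '_'] <:+: l)
    (hb : b = true → l.head? ≠ some '_') : sqP b l = l := by
  induction l generalizing b with
  | nil => rfl
  | cons c t ih =>
    have hbc : ¬ (b = true ∧ c = '_') := fun ⟨h1, h2⟩ => hb h1 (by simp [h2])
    rw [sqP_cons_keep b c t hbc]
    have ht : ¬ ['_', '_'] <:+: t := fun h' => h (h'.trans (List.suffix_cons c t).isInfix)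
    rw [ih _ ht ?_]
    intro hc hh
    simp at hc
    apply h
    cases t with
    | nil => simp at hh
    | cons d u =>
      simp at hh
      exact ⟨[], u, by simp [hc, hh]⟩

theorem sqP_rep2 (b : Bool) (l : List Char) : sqP b (rep2 l) = sqP b l := by
  induction l using rep2.induct generalizing b with
  | case1 => rfl
  | case2 c => rfl
  | case3 c d t hcd ih =>
    obtain ⟨rfl, rfl⟩ := hcd
    rw [rep2, if_pos ⟨rfl, rfl⟩]
    cases b
    · rw [sqP_cons_keep false '_' (rep2 t) (by simp),
        sqP_cons_keep false '_' ('_' :: t) (by simp)]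
      simp only [beq_self_eq_true]
      rw [sqP_cons_skip t, ih true]
    · rw [sqP_cons_skip (rep2 t), sqP_cons_skip ('_' :: t), sqP_cons_skip t, ih true]
  | case4 c d t hcd ih =>
    rw [rep2, if_neg hcd]
    by_cases hbc : b = true ∧ c = '_'
    · obtain ⟨rfl, rfl⟩ := hbc
      rw [sqP_cons_skip (rep2 (d :: t)), sqP_cons_skip (d :: t), ih true]
    · rw [sqP_cons_keep b c (rep2 (d :: t)) hbc, sqP_cons_keep b c (d :: t) hbc, ih _]

theorem collapseA_eq_sqP (fuel : Nat) (l : List Char) (h : l.length ≤ fuel) :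
    collapseA fuel l = sqP false l := by
  induction fuel generalizing l with
  | zero =>
    match l with
    | [] => rfl
    | c :: t => simp at h
  | succ f ih =>
    rw [collapseA]
    by_cases hin : PySem.Chars.isIn ['_', '_'] l = true
    · rw [if_pos hin, replace2_eq]
      have hlt := rep2_length_lt l ((PySem.Chars.isIn_iff_infix ['_', '_'] l).mp hin)
      rw [ih (rep2 l) (by omega), sqP_rep2]
    · rw [if_neg hin]
      refine (sqP_no_infix false l ?_ (by simp)).symm
      exact (PySem.Chars.isIn_eq_false_iff ['_', '_'] l).mp (by simpa using hin)

theorem foldl_sqP (l : List Char) (acc : List Char) :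
    l.foldl (fun acc c => if c == '_' && acc.head? == some '_' then acc else c :: acc) acc
      = (sqP (acc.head? == some '_') l).reverse ++ acc := by
  induction l generalizing acc with
  | nil => rfl
  | cons c t ih =>
    simp only [List.foldl_cons]
    by_cases hc : (c == '_' && acc.head? == some '_') = true
    · rw [if_pos hc]
      simp only [Bool.and_eq_true, beq_iff_eq] at hc
      rw [ih, hc.1]
      have hflag : (acc.head? == some '_') = true := by simp [hc.2]
      rw [hflag, sqP_cons_skip t]
    · rw [if_neg hc, ih]
      have hbc : ¬ ((acc.head? == some '_') = true ∧ c = '_') := by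
        intro ⟨h1, h2⟩
        exact hc (by simp [h1, h2])
      rw [sqP_cons_keep _ c t hbc]
      simp

theorem squeeze_eq (l : List Char) :
    collapseA l.length l
      = (l.foldl (fun acc c => if c == '_' && acc.head? == some '_' then acc else c :: acc)
          []).reverse := by
  rw [foldl_sqP, collapseA_eq_sqP l.length l le_rfl]
  simp

theorem alias_eq (s : String) :
    (if s = "myelprog" || s = "myel_prog" then some "myel_prog"
      else if s = "esoepi" || s = "eso_epi" then some "eso_epi"
      else if s = "neurostem" || s = "neuro_stem" then some "neuro_stem"
      else some s)
    = some ((((PySem.Dict.empty.insert "myelprog" "myel_prog").insert "esoepi"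
        "eso_epi").insert "neurostem" "neuro_stem").getD s s) := by
  by_cases h1 : s = "myelprog"; · subst h1; decide
  by_cases h2 : s = "esoepi"; · subst h2; decide
  by_cases h3 : s = "neurostem"; · subst h3; decide
  have e1 : ("myelprog" == s) = false := beq_eq_false_iff_ne.mpr (fun he => h1 he.symm)
  have e2 : ("esoepi" == s) = false := beq_eq_false_iff_ne.mpr (fun he => h2 he.symm)
  have e3 : ("neurostem" == s) = false := beq_eq_false_iff_ne.mpr (fun he => h3 he.symm)
  have : (((PySem.Dict.empty.insert "myelprog" "myel_prog").insert "esoepi"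
      "eso_epi").insert "neurostem" "neuro_stem").getD s s = s := by
    simp [PySem.Dict.getD, PySem.Dict.get?, PySem.Dict.insert, PySem.Dict.empty,
      List.find?, e1, e2, e3]
  rw [this]
  by_cases h4 : s = "myel_prog"; · subst h4; simp
  by_cases h5 : s = "eso_epi"; · subst h5; simp [h1]
  by_cases h6 : s = "neuro_stem"; · subst h6; simp [h1, h2]
  simp [h1, h2, h3, h4, h5, h6]

-- ===== VERDICT (by name: the statement is the Claim_ definition above) =====
theorem canonicalise_celltype_spec : Claim_equal_canonicalise_celltype := by
  intro value _
  unfold Spec_canonicalise_celltype canonicalise_celltype canonicalise_celltype_alt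
  match value with
  | none => rfl
  | some v =>
    simp only
    by_cases h : PySem.Str.strip v = ""
    · rw [if_pos h, if_pos h]
    · rw [if_neg h, if_neg h]
      rw [squeeze_eq, alias_eq]
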